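-- pv_equiv track=rewrite | github.com/sodrian/checkio | ch02_home/hm99_most_frequent_weekdays.py | get_all_maxes_indexes
-- ===== SOURCE A (Python) =====
-- def get_all_maxes_indexes(lst):
--     indx = []
--     vls = []
--     for i in range(len(lst)):
--         if indx == []:
--             indx.append(i)
--             vls.append(lst[i])
--         elif lst[i] == vls[0]:
--             indx.append(i)
--             vls.append(lst[i])
--         elif lst[i] > vls[0]:
--             indx = [i]
--             vls = [lst[i]]
--     return indx
-- ===== SOURCE B (Python) =====
-- def get_all_maxes_indexes(lst):
--     if not lst:
--         return []
--     m = max(lst)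
--     return [i for i, x in enumerate(lst) if x == m]
-- ===== Notes on version B (the rewrite author's own statement) =====
-- stated objective: simpler
-- what changed: Replaces A's single running-max scan with reset/append state (two parallel lists indx/vls) by a two-pass strategy: compute max(lst) first, then collect its indexes with one enumerate filter.
import Mathlib
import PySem

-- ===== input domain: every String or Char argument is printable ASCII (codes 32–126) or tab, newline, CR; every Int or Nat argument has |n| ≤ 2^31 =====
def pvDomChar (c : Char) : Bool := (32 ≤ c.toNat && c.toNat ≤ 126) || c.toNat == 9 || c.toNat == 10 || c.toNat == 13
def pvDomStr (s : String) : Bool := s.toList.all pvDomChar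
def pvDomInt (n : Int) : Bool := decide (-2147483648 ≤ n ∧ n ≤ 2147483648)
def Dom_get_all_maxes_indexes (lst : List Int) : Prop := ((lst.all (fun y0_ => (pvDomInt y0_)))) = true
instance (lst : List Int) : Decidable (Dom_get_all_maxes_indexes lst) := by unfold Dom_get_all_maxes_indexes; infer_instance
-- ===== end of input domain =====

-- B replaces A's one-pass running-max loop (indx/vls state with reset logic) by two passes:
-- max(lst) first, then an enumerate filter collecting its indexes; objective: simpler.

-- ===== PORT A =====
-- loop body of A's for-loop, as a named helper (same state (indx, vls), same branch order)
def aStep (lst : List Int) (st : List Int × List Int) (i : Int) : List Int × List Int :=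
  if st.1 = [] then
    (st.1 ++ [i], st.2 ++ [PySem.List.pyGetD lst i 0])
  else if PySem.List.pyGetD lst i 0 = PySem.List.pyGetD st.2 0 0 then
    (st.1 ++ [i], st.2 ++ [PySem.List.pyGetD lst i 0])
  else if PySem.List.pyGetD lst i 0 > PySem.List.pyGetD st.2 0 0 then
    ([i], [PySem.List.pyGetD lst i 0])
  else st

def get_all_maxes_indexes (lst : List Int) : List Int :=
  ((PySem.List.pyRange 0 lst.length 1).foldl (aStep lst) ([], [])).1

-- ===== PORT B =====
def get_all_maxes_indexes_alt (lst : List Int) : List Int :=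
  if lst = [] then []
  else
    let m := (PySem.List.max? lst (fun y => y)).getD 0
    ((PySem.List.enumerate lst 0).filter (fun p => p.2 == m)).map (fun p => p.1)

-- ===== PRECONDITION & SPEC =====
def Spec_get_all_maxes_indexes (lst : List Int) (out : List Int) : Prop := out = get_all_maxes_indexes_alt lst
instance (lst : List Int) (out : List Int) : Decidable (Spec_get_all_maxes_indexes lst out) := by unfold Spec_get_all_maxes_indexes; infer_instance

-- ===== CLAIM (what is proved, stated in full; the proofs are below) =====
def Claim_equal_get_all_maxes_indexes : Prop := ∀ (lst : List Int), Dom_get_all_maxes_indexes lst → Spec_get_all_maxes_indexes lst (get_all_maxes_indexes lst)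

-- ===== LEMMAS AND PROOFS =====

lemma pyGetD_append_left (xs ys : List Int) (i : Int) (h0 : 0 ≤ i) (h : i < xs.length) :
    PySem.List.pyGetD (xs ++ ys) i 0 = PySem.List.pyGetD xs i 0 := by
  rw [PySem.List.pyGetD_eq_getElem _ _ h0 (by simp; omega),
      PySem.List.pyGetD_eq_getElem _ _ h0 h,
      List.getElem_append_left (by omega)]

lemma pyGetD_append_len (xs : List Int) (x : Int) :
    PySem.List.pyGetD (xs ++ [x]) (xs.length : Int) 0 = x := by
  rw [PySem.List.pyGetD_eq_getElem _ _ (by positivity) (by simp)]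
  simp

lemma pyGetD_const_map_zero (l : List Int) (m : Int) (h : l ≠ []) :
    PySem.List.pyGetD (l.map (fun _ => m)) 0 0 = m := by
  cases l with
  | nil => exact absurd rfl h
  | cons a t => simp [PySem.List.pyGetD_zero_cons]

def pvIdx (m : Int) (xs : List Int) : List Int :=
  ((PySem.List.enumerate xs 0).filter (fun p => p.2 == m)).map (fun p => p.1)

lemma pvIdx_append (xs : List Int) (x m : Int) :
    pvIdx m (xs ++ [x]) = pvIdx m xs ++ (if x = m then [(xs.length : Int)] else []) := by
  simp only [pvIdx, PySem.List.enumerate_append, PySem.List.enumerate_cons,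
    PySem.List.enumerate_nil, List.filter_append, List.map_append]
  congr 1
  by_cases hx : x = m <;> simp [hx]

lemma pvIdx_ne_nil (xs : List Int) (m : Int) (h : m ∈ xs) : pvIdx m xs ≠ [] := by
  obtain ⟨k, hk, hv⟩ := List.mem_iff_getElem.mp h
  have hmem : ((k : Int), m) ∈ (PySem.List.enumerate xs 0).filter (fun p => p.2 == m) := by
    rw [List.mem_filter]
    exact ⟨(PySem.List.mem_enumerate_iff xs 0 _).mpr ⟨k, hk, by simp [hv]⟩, by simp⟩
  exact List.ne_nil_of_mem (List.mem_map_of_mem hmem)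

lemma pvIdx_eq_nil (xs : List Int) (m : Int) (h : ∀ y ∈ xs, y ≠ m) : pvIdx m xs = [] := by
  unfold pvIdx
  rw [List.filter_eq_nil_iff.mpr, List.map_nil]
  intro p hp
  obtain ⟨k, hk, rfl⟩ := (PySem.List.mem_enumerate_iff xs 0 p).mp hp
  simpa using h _ (List.getElem_mem hk)

lemma fold_char (xs : List Int) : ∀ (m : Int), m ∈ xs → (∀ y ∈ xs, y ≤ m) →
    (PySem.List.pyRange 0 xs.length 1).foldl (aStep xs) ([], [])
      = (pvIdx m xs, (pvIdx m xs).map (fun _ => m)) := by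
  induction xs using List.reverseRecOn with
  | nil => intro m hm _; simp at hm
  | append_singleton xs x IH =>
    intro m hm hub
    have hlen : ((xs ++ [x]).length : Int) = (xs.length : Int) + 1 := by simp
    rw [hlen, PySem.List.pyRange_one_succ_right (by positivity), List.foldl_append]
    have hcongr : (PySem.List.pyRange 0 xs.length 1).foldl (aStep (xs ++ [x])) ([], [])
        = (PySem.List.pyRange 0 xs.length 1).foldl (aStep xs) ([], []) := by
      apply PySem.List.foldl_congr_mem
      intro acc i hi
      have := (PySem.List.mem_pyRange_one).mp hi
      unfold aStep
      rw [pyGetD_append_left xs [x] i this.1 this.2]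
    rw [hcongr]
    have hx : PySem.List.pyGetD (xs ++ [x]) (xs.length : Int) 0 = x := pyGetD_append_len xs x
    by_cases hxs : xs = []
    · subst hxs
      simp only [List.length_nil, Nat.cast_zero, PySem.List.pyRange_zero]
      have hmx : m = x := by simpa using hm
      subst hmx
      unfold aStep
      simp [pvIdx, PySem.List.enumerate_cons, PySem.List.enumerate_nil]
    · obtain ⟨m', hms⟩ : ∃ m', PySem.List.max? xs (fun y => y) = some m' := by
        cases h : PySem.List.max? xs (fun y => y) with
        | none => exact absurd ((PySem.List.max?_eq_none_iff xs (fun y => y)).mp h) hxs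
        | some m' => exact ⟨m', rfl⟩
      have hm' : m' ∈ xs := PySem.List.max?_mem hms
      have hub' : ∀ y ∈ xs, y ≤ m' := PySem.List.max?_isMax hms
      rw [IH m' hm' hub', List.foldl_cons, List.foldl_nil]
      have hne : pvIdx m' xs ≠ [] := pvIdx_ne_nil xs m' hm'
      have hhead : PySem.List.pyGetD ((pvIdx m' xs).map (fun _ => m')) 0 0 = m' :=
        pyGetD_const_map_zero _ _ hne
      rcases lt_trichotomy x m' with hlt | heq | hgt
      · -- x < m' : state unchanged; m = m'
        have hmm : m = m' := le_antisymm
          (by rcases List.mem_append.mp hm with h1 | h1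
              · exact hub' m h1
              · simp at h1; omega)
          (hub m' (List.mem_append_left _ hm'))
        subst hmm
        simp only [aStep, hx, hhead]
        rw [if_neg hne, if_neg (by omega), if_neg (by omega)]
        rw [pvIdx_append, if_neg (by omega)]
        simp
      · -- x = m' : append branch; m = m'
        subst heq
        have hmm : m = x := le_antisymm
          (by rcases List.mem_append.mp hm with h1 | h1
              · exact hub' m h1
              · simp at h1; omega)
          (hub x (List.mem_append_right _ (by simp)))
        subst hmm
        simp only [aStep, hx, hhead]
        rw [pvIdx_append]
        simp [hne]
      · -- x > m' : reset; m = x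
        have hmm : m = x := le_antisymm
          (by rcases List.mem_append.mp hm with h1 | h1
              · have := hub' m h1; omega
              · simp at h1; omega)
          (hub x (List.mem_append_right _ (by simp)))
        subst hmm
        simp only [aStep, hx, hhead]
        rw [if_neg hne, if_neg (by omega), if_pos (by omega)]
        rw [pvIdx_append, if_pos rfl, pvIdx_eq_nil xs m (fun y hy => by have := hub' y hy; omega)]
        simp

-- ===== VERDICT (by name: the statement is the Claim_ definition above) =====
theorem get_all_maxes_indexes_spec : Claim_equal_get_all_maxes_indexes := by
  intro lst _
  unfold Spec_get_all_maxes_indexes get_all_maxes_indexes get_all_maxes_indexes_alt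
  by_cases hnil : lst = []
  · subst hnil; simp [PySem.List.pyRange]
  · rw [if_neg hnil]
    obtain ⟨m, hms⟩ : ∃ m, PySem.List.max? lst (fun y => y) = some m := by
      cases h : PySem.List.max? lst (fun y => y) with
      | none => exact absurd ((PySem.List.max?_eq_none_iff lst (fun y => y)).mp h) hnil
      | some m => exact ⟨m, rfl⟩
    have hm : m ∈ lst := PySem.List.max?_mem hms
    have hub : ∀ y ∈ lst, y ≤ m := PySem.List.max?_isMax hms
    rw [fold_char lst m hm hub, hms]
    rfl
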